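-- pv_equiv track=rewrite | github.com/extraplanarlense/CodeAdvent21 | Day03/Day03.py | calc_co2_scrubbing_rating
-- ===== SOURCE A (Python) =====
-- def calc_co2_scrubbing_rating(input):
--     c_s_r = input
--     counter = 0
--     while len(c_s_r) > 1:
--         ones = []
--         zeroes = []
--         for current_number in c_s_r:
--             if current_number[counter] == "0":
--                zeroes.append(current_number)
--             else:
--                 ones.append(current_number)
--         if (len(ones) > len(zeroes)) or (len(ones) == len(zeroes)):
--             c_s_r = zeroes
--         else:
--             c_s_r = ones
--         counter += 1
--     return [int(i) for i in str(c_s_r[0])]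
-- ===== SOURCE B (Python) =====
-- def calc_co2_scrubbing_rating(input):
--     # Keep only the list of boolean keep-zero decisions; re-derive the
--     # surviving pool from the original input each round by matching that
--     # pattern, and decide each round with a single zero count, instead of
--     # carrying and re-partitioning shrinking zeroes/ones lists.
--     pattern = []
--     while True:
--         pool = [s for s in input
--                 if all((s[i] == "0") == keep_zero
--                        for i, keep_zero in enumerate(pattern))]
--         if len(pool) <= 1:
--             return [int(d) for d in pool[0]]
--         zeroes = sum(s[len(pattern)] == "0" for s in pool)
--         pattern.append(2 * zeroes <= len(pool))
-- ===== Notes on version B (the rewrite author's own statement) =====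
-- stated objective: alternative
-- what changed: Instead of carrying and re-partitioning shrinking zeroes/ones lists each round, B keeps only the list of boolean keep-zero decisions and re-derives the surviving pool from the original input each round by pattern matching, deciding each round with a single zero count.
import Mathlib
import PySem

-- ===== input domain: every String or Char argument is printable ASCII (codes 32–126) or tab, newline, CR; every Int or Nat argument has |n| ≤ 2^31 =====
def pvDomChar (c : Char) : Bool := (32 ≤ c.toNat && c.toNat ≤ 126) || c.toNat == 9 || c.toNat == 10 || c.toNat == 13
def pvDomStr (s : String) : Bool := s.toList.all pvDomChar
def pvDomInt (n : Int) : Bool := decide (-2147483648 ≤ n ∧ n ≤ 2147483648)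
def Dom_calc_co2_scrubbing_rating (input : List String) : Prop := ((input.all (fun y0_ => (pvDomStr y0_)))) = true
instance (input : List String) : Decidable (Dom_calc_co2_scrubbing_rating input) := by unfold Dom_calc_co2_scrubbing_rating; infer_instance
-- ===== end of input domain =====

-- B keeps only the list of boolean keep-zero decisions and re-derives the surviving pool
-- from the original input each round (pattern match + one zero count), instead of carrying
-- and re-partitioning shrinking zeroes/ones lists (objective: alternative algorithm).

-- ===== PORT A =====
-- int(ch) for each character ch of the surviving string; none where Python raises ValueError
def pvDigits? (cs : List Char) : Option (List Int) :=
  cs.mapM (fun c => PySem.Int.ofChars? [c])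

-- the for-loop building (zeroes, ones); none = IndexError inside the loop (outside Pre_)
def pvPartA (csr : List String) (counter : Int) : Option (List String × List String) :=
  csr.foldl
    (fun acc s => acc.bind (fun zo =>
      (PySem.Str.pyGet? s counter).map (fun c =>
        if c = '0' then (zo.1 ++ [s], zo.2) else (zo.1, zo.2 ++ [s]))))
    (some ([], []))

theorem pvPartA_go_lengths (counter : Int) :
    ∀ (csr : List String) (z₀ o₀ z o : List String),
      csr.foldl
        (fun acc s => acc.bind (fun zo =>
          (PySem.Str.pyGet? s counter).map (fun c =>
            if c = '0' then (zo.1 ++ [s], zo.2) else (zo.1, zo.2 ++ [s]))))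
        (some (z₀, o₀)) = some (z, o) →
      z.length + o.length = z₀.length + o₀.length + csr.length := by
  intro csr
  induction csr with
  | nil => intro z₀ o₀ z o h; simp at h; simp [h.1.symm, h.2.symm]
  | cons s rest ih =>
      intro z₀ o₀ z o h
      simp only [List.foldl_cons, Option.bind_some] at h
      cases hg : PySem.Str.pyGet? s counter with
      | none =>
          rw [hg] at h; simp only [Option.map_none] at h
          exfalso
          -- folding from none stays none
          have : ∀ (l : List String) (f : Option (List String × List String) →
              String → Option (List String × List String)),
              (∀ x, f none x = none) → l.foldl f none = none := by
            intro l
            induction l with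
            | nil => intro f _; rfl
            | cons a t iht => intro f hf; rw [List.foldl_cons, hf a]; exact iht f hf
          rw [this rest _ (by intro x; rfl)] at h
          simp at h
      | some c =>
          rw [hg] at h; simp only [Option.map_some] at h
          by_cases hc : c = '0'
          · rw [if_pos hc] at h
            have := ih (z₀ ++ [s]) o₀ z o h
            simp [List.length_append] at this ⊢
            omega
          · rw [if_neg hc] at h
            have := ih z₀ (o₀ ++ [s]) z o h
            simp [List.length_append] at this ⊢
            omega

theorem pvPartA_lengths (csr : List String) (counter : Int) (z o : List String)
    (h : pvPartA csr counter = some (z, o)) : z.length + o.length = csr.length := by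
  have := pvPartA_go_lengths counter csr [] [] z o h
  simpa using this

-- the while-loop; none = IndexError (raised inside the for-loop); the state is (c_s_r, counter)
def pvLoopA (csr : List String) (counter : Int) : Option (List String) :=
  if h : csr.length > 1 then
    match hp : pvPartA csr counter with
    | none => none
    | some (z, o) =>
        pvLoopA (if o.length > z.length ∨ o.length = z.length then z else o) (counter + 1)
  else some csr
termination_by csr.length
decreasing_by
  have hzo := pvPartA_lengths csr counter z o hp
  split <;> omega

def calc_co2_scrubbing_rating (input : List String) : List Int :=
  match pvLoopA input 0 with
  | none => []                              -- Python raised IndexError inside the loop (outside Pre_)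
  | some csr =>
      match PySem.List.pyGet? csr 0 with
      | none => []                          -- c_s_r[0] raised IndexError (outside Pre_)
      | some s => (pvDigits? s.toList).getD []  -- int(i) raised ValueError on none (outside Pre_)

-- ===== PORT B =====
-- all((s[i] == "0") == keep_zero for i, keep_zero in enumerate(pattern)), scanning from
-- position i with Python's short-circuit; none = IndexError
def pvMatch? (s : String) (pat : List Bool) (i : Nat) : Option Bool :=
  match pat with
  | [] => some true
  | b :: rest =>
      match PySem.Str.pyGet? s (i : Int) with
      | none => none
      | some c => if (c == '0') == b then pvMatch? s rest (i + 1) else some false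

-- the pool comprehension; none = IndexError on the first offending string
def pvPoolB? (input : List String) (pat : List Bool) : Option (List String) :=
  match input with
  | [] => some []
  | s :: rest =>
      match pvMatch? s pat 0 with
      | none => none
      | some true => (pvPoolB? rest pat).map (s :: ·)
      | some false => pvPoolB? rest pat

-- sum(s[k] == "0" for s in pool); none = IndexError on the first offending string
def pvCount0? (pool : List String) (k : Nat) : Option Nat :=
  match pool with
  | [] => some 0
  | s :: rest =>
      match PySem.Str.pyGet? s (k : Int) with
      | none => none
      | some c => (pvCount0? rest k).map (fun m => (if c = '0' then 1 else 0) + m)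

-- the three lemmas below are cited by pvLoopB's decreasing_by (the re-derived pool shrinks)
theorem pvMatch?_snoc (s : String) (b : Bool) :
    ∀ (pat : List Bool) (i : Nat),
      pvMatch? s (pat ++ [b]) i =
        match pvMatch? s pat i with
        | none => none
        | some false => some false
        | some true =>
            match s.toList[i + pat.length]? with
            | none => none
            | some c => some ((c == '0') == b)
  := by
  intro pat
  induction pat with
  | nil =>
      intro i
      simp only [List.nil_append, pvMatch?, PySem.Str.pyGet?_natCast, List.length_nil,
        Nat.add_zero]
      cases s.toList[i]? with
      | none => rfl
      | some c =>
          dsimp only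
          cases hcb : (c == '0') == b <;> rfl
  | cons b0 rest ih =>
      intro i
      simp only [List.cons_append, pvMatch?, PySem.Str.pyGet?_natCast]
      cases s.toList[i]? with
      | none => rfl
      | some c =>
          dsimp only
          by_cases hc : ((c == '0') == b0) = true
          · rw [if_pos hc, if_pos hc, ih (i + 1)]
            simp only [List.length_cons]
            rw [show i + 1 + rest.length = i + (rest.length + 1) from by omega]
          · rw [if_neg hc, if_neg hc]

theorem pvCount0?_some (k : Nat) :
    ∀ (pool : List String) (z : Nat), pvCount0? pool k = some z →
      z = (pool.filter (fun s => s.toList[k]? == some '0')).length ∧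
      ∀ s ∈ pool, (s.toList[k]?).isSome := by
  intro pool
  induction pool with
  | nil => intro z h; simp [pvCount0?] at h; simp [h.symm]
  | cons s rest ih =>
      intro z h
      rw [pvCount0?, PySem.Str.pyGet?_natCast] at h
      cases hg : s.toList[k]? with
      | none => rw [hg] at h; simp at h
      | some c =>
          rw [hg] at h
          cases hr : pvCount0? rest k with
          | none => rw [hr] at h; simp at h
          | some m =>
              rw [hr] at h
              simp only [Option.map_some, Option.some_inj] at h
              obtain ⟨hm, hall⟩ := ih m hr
              constructor
              · rw [← h, hm, List.filter_cons]
                by_cases hc : c = '0'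
                · simp [hg, hc, Nat.add_comm]
                · simp [hg, hc]
              · intro t ht
                rcases List.mem_cons.mp ht with rfl | ht'
                · simp [hg]
                · exact hall t ht'

theorem pvPoolB?_snoc (pat : List Bool) (b : Bool) :
    ∀ (input pool : List String), pvPoolB? input pat = some pool →
      (∀ s ∈ pool, (s.toList[pat.length]?).isSome) →
      pvPoolB? input (pat ++ [b])
        = some (pool.filter (fun s => (s.toList[pat.length]? == some '0') == b)) := by
  intro input
  induction input with
  | nil =>
      intro pool h _
      simp only [pvPoolB?, Option.some_inj] at h
      simp [pvPoolB?, ← h]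
  | cons s rest ih =>
      intro pool h hall
      rw [pvPoolB?] at h ⊢
      rw [pvMatch?_snoc]
      cases hm : pvMatch? s pat 0 with
      | none => rw [hm] at h; simp at h
      | some tv =>
          rw [hm] at h
          cases tv with
          | false =>
              simp only at h ⊢
              exact ih pool h hall
          | true =>
              simp only at h ⊢
              cases hr : pvPoolB? rest pat with
              | none => rw [hr] at h; simp at h
              | some tail =>
                  rw [hr] at h
                  simp only [Option.map_some, Option.some_inj] at h
                  have hs : s ∈ pool := by rw [← h]; simp
                  have hsome := hall s hs
                  rw [Nat.zero_add]
                  cases hg : s.toList[pat.length]? with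
                  | none => rw [hg] at hsome; simp at hsome
                  | some c =>
                      have htail := ih tail hr (fun t ht => hall t (by rw [← h]; simp [ht]))
                      dsimp only
                      cases hcb : (c == '0') == b
                      · rw [htail, ← h, List.filter_cons]
                        simp [hg, hcb]
                      · rw [htail, ← h, List.filter_cons]
                        simp [hg, hcb]

-- the while-loop over the decision pattern; none = IndexError (outside Pre_)
def pvLoopB (input : List String) (pat : List Bool) : Option (List String) :=
  match hpool : pvPoolB? input pat with
  | none => none
  | some pool =>
      if hlen : pool.length > 1 then
        match hz : pvCount0? pool pat.length with
        | none => none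
        | some z => pvLoopB input (pat ++ [decide (2 * z ≤ pool.length)])
      else some pool
termination_by (pvPoolB? input pat).elim 0 List.length
decreasing_by
  obtain ⟨hzval, hall⟩ := pvCount0?_some pat.length pool z hz
  rw [pvPoolB?_snoc pat _ input pool hpool hall, hpool]
  simp only [Option.elim_some]
  by_cases hb : 2 * z ≤ pool.length
  · rw [decide_eq_true hb]
    have : (pool.filter (fun s => (s.toList[pat.length]? == some '0') == true)).length
        = (pool.filter (fun s => s.toList[pat.length]? == some '0')).length := by
      simp
    rw [this]
    omega
  · rw [decide_eq_false hb]
    have hsplit := List.length_eq_length_filter_add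
      (l := pool) (fun s => s.toList[pat.length]? == some '0')
    have : (pool.filter (fun s => (s.toList[pat.length]? == some '0') == false)).length
        = (pool.filter (fun s => !(s.toList[pat.length]? == some '0'))).length := by
      simp
    rw [this]
    omega

def calc_co2_scrubbing_rating_alt (input : List String) : List Int :=
  match pvLoopB input [] with
  | none => []                              -- Python raised IndexError inside the loop (outside Pre_)
  | some pool =>
      match PySem.List.pyGet? pool 0 with
      | none => []                          -- pool[0] raised IndexError (outside Pre_)
      | some s => (pvDigits? s.toList).getD []  -- int(d) raised ValueError on none (outside Pre_)

-- ===== PRECONDITION & SPEC =====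
-- every character is a decimal digit (so Python's int() accepts each of them)
def pvAllDigits (s : String) : Bool := s.toList.all Char.isDigit
-- the keep-zero profile of a string: which positions hold '0'
def pvProfile (s : String) : List Bool := s.toList.map (· == '0')
-- the strings whose profile starts with the given decision pattern
def pvPool (input : List String) (p : List Bool) : List String :=
  input.filter (fun s => decide (p <+: pvProfile s))

-- the CO2 decision sequence of the task: at each round, keep the zeroes side when ones
-- are at least as many (the tie-to-zeroes rule), written as a list of keep-zero bits
def pvPath (input : List String) : Nat → List Bool
  | 0 => []
  | k + 1 =>
      let p := pvPath input k
      p ++ [decide (2 * ((pvPool input p).filter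
            (fun s => s.toList[p.length]? == some '0')).length ≤ (pvPool input p).length)]

def pvMaxLen (input : List String) : Nat := input.foldr (fun s m => max s.toList.length m) 0

-- Pre_ = A returns normally: the CO2 decision chain reaches a pool of exactly one
-- all-digit string after some number k of rounds, every earlier round having ≥ 2
-- candidates all long enough to be indexed.  Elsewhere A raises: IndexError when the kept
-- side empties or a bit index overruns a string (including empty input), ValueError when
-- the surviving string has a non-digit character.
def Pre_calc_co2_scrubbing_rating (input : List String) : Prop :=
  ∃ k ≤ pvMaxLen input,
    (pvPool input (pvPath input k)).length = 1
    ∧ (pvPool input (pvPath input k)).all pvAllDigits = true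
    ∧ ∀ j < k, 2 ≤ (pvPool input (pvPath input j)).length
        ∧ ∀ t ∈ pvPool input (pvPath input j), j < t.toList.length

instance (input : List String) : Decidable (Pre_calc_co2_scrubbing_rating input) := by
  unfold Pre_calc_co2_scrubbing_rating; infer_instance

def pvWitness_calc_co2_scrubbing_rating : List String := ["00", "01", "10", "11"]

def Spec_calc_co2_scrubbing_rating (input : List String) (out : List Int) : Prop := out = calc_co2_scrubbing_rating_alt input
instance (input : List String) (out : List Int) : Decidable (Spec_calc_co2_scrubbing_rating input out) := by unfold Spec_calc_co2_scrubbing_rating; infer_instance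

-- ===== CLAIM (what is proved, stated in full; the proofs are below) =====
def Claim_equal_calc_co2_scrubbing_rating : Prop := ∀ (input : List String), Dom_calc_co2_scrubbing_rating input → Pre_calc_co2_scrubbing_rating input → Spec_calc_co2_scrubbing_rating input (calc_co2_scrubbing_rating input)

-- ===== LEMMAS AND PROOFS =====

theorem pvPool_nil (input : List String) : pvPool input [] = input := by
  simp [pvPool]

theorem pvPoolB?_nil (input : List String) : pvPoolB? input [] = some input := by
  induction input with
  | nil => rfl
  | cons s rest ih => rw [pvPoolB?, pvMatch?, ih, Option.map_some]

-- p ++ [b] is a prefix iff p is and the next element is b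
theorem pvPrefix_snoc_iff {α : Type} (p l : List α) (b : α) (h : p.length < l.length) :
    (p ++ [b] <+: l) ↔ (p <+: l ∧ l[p.length]? = some b) := by
  constructor
  · rintro ⟨t, ht⟩
    rw [List.append_assoc] at ht
    refine ⟨⟨[b] ++ t, ht⟩, ?_⟩
    rw [← ht, List.getElem?_append_right le_rfl]
    simp
  · rintro ⟨⟨t, ht⟩, hb⟩
    subst ht
    rw [List.getElem?_append_right le_rfl] at hb
    simp only [Nat.sub_self] at hb
    cases t with
    | nil => simp at h
    | cons x t' =>
        simp only [List.getElem?_cons_zero, Option.some_inj] at hb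
        subst hb
        exact ⟨t', by simp⟩

-- extending the pattern refines the pool by the bit test at position |p|
theorem pvPool_snoc (input : List String) (p : List Bool) (b : Bool)
    (hvalid : ∀ t ∈ pvPool input p, p.length < t.toList.length) :
    pvPool input (p ++ [b])
      = (pvPool input p).filter (fun s => (s.toList[p.length]? == some '0') == b) := by
  unfold pvPool
  rw [List.filter_filter]
  apply List.filter_congr
  intro s hs
  by_cases hp : p <+: pvProfile s
  · have hmem : s ∈ pvPool input p := by
      unfold pvPool
      rw [List.mem_filter]
      exact ⟨hs, by simp [hp]⟩
    have hlen : p.length < s.toList.length := hvalid s hmem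
    have hlen' : p.length < (pvProfile s).length := by
      simpa [pvProfile] using hlen
    have hgp : s.toList[p.length]? = some s.toList[p.length] := List.getElem?_eq_getElem hlen
    have hprof : (pvProfile s)[p.length]? = some (s.toList[p.length] == '0') := by
      simp [pvProfile, List.getElem?_map, hgp]
    have hiff : (p ++ [b] <+: pvProfile s) ↔ ((s.toList[p.length] == '0') = b) := by
      rw [pvPrefix_snoc_iff p (pvProfile s) b hlen', hprof]
      simp [hp]
    rw [hgp]
    by_cases hc : (s.toList[p.length] == '0') = b
    · simp [hiff.mpr hc, hp, hc]
    · have : ¬ (p ++ [b] <+: pvProfile s) := fun hx => hc (hiff.mp hx)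
      simp [this, hp]
      simpa using hc
  · have h1 : ¬ (p ++ [b] <+: pvProfile s) := fun hc => hp ((p.prefix_append [b]).trans hc)
    simp [hp, h1]

-- B's pool takes ≤ 1 element: its loop stops with that pool
theorem pvLoopB_of_le_one (input : List String) (pat : List Bool) (pool : List String)
    (hpool : pvPoolB? input pat = some pool) (hle : pool.length ≤ 1) :
    pvLoopB input pat = some pool := by
  rw [pvLoopB, hpool]
  simp only []
  rw [dif_neg (by omega)]

-- A's partition at counter j is a pair of filters when every index is valid
theorem pvPartA_go_filter (j : Nat) :
    ∀ (csr z₀ o₀ : List String), (∀ s ∈ csr, j < s.toList.length) →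
      csr.foldl
        (fun acc s => acc.bind (fun zo =>
          (PySem.Str.pyGet? s (j : Int)).map (fun c =>
            if c = '0' then (zo.1 ++ [s], zo.2) else (zo.1, zo.2 ++ [s]))))
        (some (z₀, o₀))
      = some (z₀ ++ csr.filter (fun s => s.toList[j]? == some '0'),
              o₀ ++ csr.filter (fun s => !(s.toList[j]? == some '0'))) := by
  intro csr
  induction csr with
  | nil => intro z₀ o₀ _; simp
  | cons s rest ih =>
      intro z₀ o₀ hall
      have hj : j < s.toList.length := hall s (by simp)
      have hsome : s.toList[j]? = some s.toList[j] := List.getElem?_eq_getElem hj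
      simp only [List.foldl_cons, Option.bind_some]
      rw [show PySem.Str.pyGet? s (j : Int) = some s.toList[j] from by
        rw [PySem.Str.pyGet?_natCast, hsome]]
      simp only [Option.map_some]
      by_cases hc : s.toList[j] = '0'
      · rw [if_pos hc]
        rw [ih (z₀ ++ [s]) o₀ (fun t ht => hall t (by simp [ht]))]
        have hq : (s.toList[j]? == some '0') = true := by simp [hsome, hc]
        simp [List.filter_cons, hq, List.append_assoc]
      · rw [if_neg hc]
        rw [ih z₀ (o₀ ++ [s]) (fun t ht => hall t (by simp [ht]))]
        have hq : (s.toList[j]? == some '0') = false := by simp [hsome, hc]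
        simp [List.filter_cons, hq, List.append_assoc]

theorem pvPartA_filter (csr : List String) (j : Nat) (h : ∀ s ∈ csr, j < s.toList.length) :
    pvPartA csr (j : Int)
      = some (csr.filter (fun s => s.toList[j]? == some '0'),
              csr.filter (fun s => !(s.toList[j]? == some '0'))) := by
  have := pvPartA_go_filter j csr [] [] h
  simpa [pvPartA] using this

theorem pvCount0?_of_valid (k : Nat) :
    ∀ (pool : List String), (∀ s ∈ pool, (s.toList[k]?).isSome) →
      pvCount0? pool k = some ((pool.filter (fun s => s.toList[k]? == some '0')).length) := by
  intro pool
  induction pool with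
  | nil => intro _; rfl
  | cons s rest ih =>
      intro hall
      have hsome := hall s (by simp)
      rw [pvCount0?, PySem.Str.pyGet?_natCast]
      cases hg : s.toList[k]? with
      | none => rw [hg] at hsome; simp at hsome
      | some c =>
          rw [ih (fun t ht => hall t (by simp [ht]))]
          dsimp only
          by_cases hc : c = '0'
          · simp [List.filter_cons, hg, hc, Nat.add_comm]
          · simp [List.filter_cons, hg, hc]

-- the decision pattern after k rounds has length k
theorem pvPath_length (input : List String) (k : Nat) : (pvPath input k).length = k := by
  induction k with
  | zero => rfl
  | succ k ih => simp [pvPath, ih]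

-- MAIN: along the decision chain, A's loop on the re-derived pool equals B's loop
theorem pvLoops_eq (input : List String) (k : Nat)
    (hk1 : (pvPool input (pvPath input k)).length = 1)
    (hrounds : ∀ j < k, 2 ≤ (pvPool input (pvPath input j)).length
        ∧ ∀ t ∈ pvPool input (pvPath input j), j < t.toList.length) :
    ∀ (d j : Nat), j + d = k →
      pvPoolB? input (pvPath input j) = some (pvPool input (pvPath input j)) →
      pvLoopA (pvPool input (pvPath input j)) ((pvPath input j).length : Int)
        = pvLoopB input (pvPath input j) := by
  intro d
  induction d with
  | zero =>
      intro j hj hB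
      have hj' : j = k := by omega
      subst hj'
      rw [pvLoopA, dif_neg (by omega), pvLoopB_of_le_one input _ _ hB (by omega)]
  | succ d ih =>
      intro j hj hB
      obtain ⟨h2, hvalid'⟩ := hrounds j (by omega)
      have hlen : (pvPath input j).length = j := pvPath_length input j
      have hvalid : ∀ t ∈ pvPool input (pvPath input j),
          (pvPath input j).length < t.toList.length := by
        intro t ht; rw [hlen]; exact hvalid' t ht
      have hsome : ∀ t ∈ pvPool input (pvPath input j),
          (t.toList[(pvPath input j).length]?).isSome := fun t ht => by
        rw [List.getElem?_eq_getElem (hvalid t ht)]; rfl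
      have hpart := pvPartA_filter (pvPool input (pvPath input j)) (pvPath input j).length hvalid
      have hcount := pvCount0?_of_valid (pvPath input j).length (pvPool input (pvPath input j)) hsome
      have hsplit := List.length_eq_length_filter_add
        (l := pvPool input (pvPath input j))
        (fun s => s.toList[(pvPath input j).length]? == some '0')
      rw [pvLoopA, dif_pos (by omega), hpart]
      rw [pvLoopB, hB]
      simp only []
      rw [dif_pos (by omega), hcount]
      simp only []
      -- the appended bit is by definition the chain's next decision
      have hpath : pvPath input (j + 1)
          = pvPath input j ++ [decide (2 * ((pvPool input (pvPath input j)).filter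
              (fun s => s.toList[(pvPath input j).length]? == some '0')).length
              ≤ (pvPool input (pvPath input j)).length)] := rfl
      by_cases hb : 2 * ((pvPool input (pvPath input j)).filter
          (fun s => s.toList[(pvPath input j).length]? == some '0')).length
          ≤ (pvPool input (pvPath input j)).length
      · -- ones ≥ zeroes: both keep the zeroes side
        rw [decide_eq_true hb] at hpath ⊢
        have hnew := pvPool_snoc input (pvPath input j) true hvalid
        rw [← hpath] at hnew
        have hB' : pvPoolB? input (pvPath input (j + 1))
            = some (pvPool input (pvPath input (j + 1))) := by
          rw [hpath, pvPoolB?_snoc (pvPath input j) true input _ hB hsome]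
          rw [hpath] at hnew
          rw [← hnew]
        have hzeq : pvPool input (pvPath input (j + 1))
            = (pvPool input (pvPath input j)).filter
                (fun s => s.toList[(pvPath input j).length]? == some '0') := by
          rw [hnew]; simp
        have hIH := ih (j + 1) (by omega) hB'
        rw [hpath] at hIH hzeq
        rw [if_pos (by omega), ← hzeq,
          show (((pvPath input j).length : Int) + 1)
              = (((pvPath input j ++ [true]).length : Nat) : Int) from by simp]
        exact hIH
      · -- zeroes > ones: both keep the ones side
        rw [decide_eq_false hb] at hpath ⊢
        have hnew := pvPool_snoc input (pvPath input j) false hvalid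
        rw [← hpath] at hnew
        have hB' : pvPoolB? input (pvPath input (j + 1))
            = some (pvPool input (pvPath input (j + 1))) := by
          rw [hpath, pvPoolB?_snoc (pvPath input j) false input _ hB hsome]
          rw [hpath] at hnew
          rw [← hnew]
        have hoeq : pvPool input (pvPath input (j + 1))
            = (pvPool input (pvPath input j)).filter
                (fun s => !(s.toList[(pvPath input j).length]? == some '0')) := by
          rw [hnew]; simp
        have hIH := ih (j + 1) (by omega) hB'
        rw [hpath] at hIH hoeq
        rw [if_neg (by omega), ← hoeq,
          show (((pvPath input j).length : Int) + 1)
              = (((pvPath input j ++ [false]).length : Nat) : Int) from by simp]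
        exact hIH

-- ===== VERDICT (by name: the statement is the Claim_ definition above) =====
theorem calc_co2_scrubbing_rating_spec : Claim_equal_calc_co2_scrubbing_rating := by
  intro input _ hpre
  unfold Spec_calc_co2_scrubbing_rating
  obtain ⟨k, _, hk1, _, hrounds⟩ := hpre
  unfold calc_co2_scrubbing_rating calc_co2_scrubbing_rating_alt
  have h := pvLoops_eq input k hk1 hrounds k 0 (by omega)
    (by rw [show pvPath input 0 = [] from rfl, pvPool_nil]; exact pvPoolB?_nil input)
  rw [show pvPath input 0 = [] from rfl, pvPool_nil] at h
  simp only [List.length_nil, Nat.cast_zero] at h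
  rw [h]
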